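-- pv_equiv track=rewrite | github.com/DongHyunByun/algorithm_practice | past_archive/programmers/더맵게(heap(직접구현), 시간초과).py | solution
-- ===== SOURCE A (Python) =====
-- def heapify(unsorted, index, heap_size):
--     smallist = index
--     left_index = 2 * index + 1
--     right_index = 2 * index + 2
--     if left_index < heap_size and unsorted[left_index] < unsorted[smallist]:
--         smallist = left_index
--     if right_index < heap_size and unsorted[right_index] < unsorted[smallist]:
--         smallist = right_index
--     if smallist != index:
--         unsorted[smallist], unsorted[index] = unsorted[index], unsorted[smallist]
--         heapify(unsorted, smallist, heap_size)
--
-- def solution(scoville, K):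
--     n=len(scoville)
--     #hepify
--     for i in range(n//2-1,-1,-1):
--         heapify(scoville,i,n)
--     ans=0
--     while (scoville[0]<K):
--         if len(scoville)==1:
--             return -1
--
--         a=scoville[0]
--         scoville[0]=scoville.pop()
--         heapify(scoville,0,len(scoville))
--         scoville[0]=a+scoville[0]*2
--         heapify(scoville,0,len(scoville))
--
--         ans+=1
--
--     return ans
-- ===== SOURCE B (Python) =====
-- def solution(scoville, K):
--     # Sorted-list simulation: keep the pot values in a sorted list, repeatedly
--     # merge the two front (smallest) values and re-insert the mixture in order.
--     s = sorted(scoville)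
--     ans = 0
--     while s[0] < K:
--         if len(s) == 1:
--             return -1
--         new = s[0] + 2 * s[1]
--         s = s[2:]
--         i = 0
--         while i < len(s) and s[i] < new:
--             i += 1
--         s.insert(i, new)
--         ans += 1
--     return ans
-- ===== Notes on version B (the rewrite author's own statement) =====
-- stated objective: alternative
-- what changed: Replaces A's hand-written array binary heap (build-heap plus sift-down after each pop/merge) by a sorted list consumed from the front with linear-scan ordered re-insertion of each merged value; same count of merges is returned.
import Mathlib
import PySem

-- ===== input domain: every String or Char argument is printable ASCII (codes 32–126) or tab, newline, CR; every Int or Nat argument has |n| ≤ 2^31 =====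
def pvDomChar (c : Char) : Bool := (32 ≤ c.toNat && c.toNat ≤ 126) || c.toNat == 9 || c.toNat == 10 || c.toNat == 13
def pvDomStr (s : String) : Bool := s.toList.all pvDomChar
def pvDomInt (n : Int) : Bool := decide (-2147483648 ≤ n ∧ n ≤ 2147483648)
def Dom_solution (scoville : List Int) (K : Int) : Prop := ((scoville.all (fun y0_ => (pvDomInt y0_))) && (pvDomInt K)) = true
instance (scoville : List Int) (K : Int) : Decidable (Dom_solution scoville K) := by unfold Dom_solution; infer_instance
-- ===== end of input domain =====

-- B replaces A's hand-written binary heap by a sorted list that is consumed from the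
-- front and re-filled by ordered insertion (alternative decomposition, not faster).
-- Equivalence is about the RETURN value only: Python A heapifies/consumes its argument
-- list in place, B leaves it untouched.

-- ===== PORT A =====
-- All indices A uses are nonnegative (range(n//2-1,-1,-1) only yields i ≥ 0, children are
-- 2i+1/2i+2), and every access is guarded by `< heap_size ≤ len`, so Nat indexing with
-- List.getD is exact; range(n//2-1,-1,-1) is exactly (List.range (n/2)).reverse.

-- index of the smallest among index and its in-range children (A's two `if`s)
def heapSmall1 (l : List Int) (index heapSize : Nat) : Nat :=
  if 2*index+1 < heapSize ∧ l.getD (2*index+1) 0 < l.getD index 0 then 2*index+1 else index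

def heapSmall (l : List Int) (index heapSize : Nat) : Nat :=
  if 2*index+2 < heapSize ∧ l.getD (2*index+2) 0 < l.getD (heapSmall1 l index heapSize) 0
  then 2*index+2 else heapSmall1 l index heapSize

-- cited by heapifyA's decreasing_by
theorem heapSmall_lt (l : List Int) (index heapSize : Nat)
    (h : heapSmall l index heapSize ≠ index) :
    index < heapSmall l index heapSize ∧ heapSmall l index heapSize < heapSize := by
  unfold heapSmall heapSmall1 at *
  split_ifs at * <;> omega

def heapifyA (l : List Int) (index heapSize : Nat) : List Int :=
  if h : heapSmall l index heapSize ≠ index then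
    heapifyA ((l.set (heapSmall l index heapSize) (l.getD index 0)).set index
      (l.getD (heapSmall l index heapSize) 0)) (heapSmall l index heapSize) heapSize
  else l
termination_by heapSize - index
decreasing_by
  have := heapSmall_lt l index heapSize h
  omega

-- cited by loopA's decreasing_by
theorem heapifyA_length (l : List Int) (index heapSize : Nat) :
    (heapifyA l index heapSize).length = l.length := by
  fun_induction heapifyA l index heapSize with
  | case1 l i h ih => simpa using ih
  | case2 => rfl

-- one iteration of A's while-loop body
def stepA (l : List Int) : List Int :=
  let a := l.getD 0 0
  let l1 := (l.dropLast).set 0 (l.getLast?.getD 0)   -- scoville[0] = scoville.pop()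
  let l2 := heapifyA l1 0 l1.length
  let l3 := l2.set 0 (a + l2.getD 0 0 * 2)           -- scoville[0] = a + scoville[0]*2
  heapifyA l3 0 l3.length

-- cited by loopA's decreasing_by
theorem stepA_length (l : List Int) : (stepA l).length = l.length - 1 := by
  simp [stepA, heapifyA_length]

-- the while loop of A (python: `while scoville[0] < K`); on the empty list Python raises
-- IndexError (excluded by Pre_), so the `length ≤ 1` guard only makes the recursion total.
def loopA (l : List Int) (K : Int) (ans : Int) : Int :=
  if l.getD 0 0 < K then
    if h : l.length ≤ 1 then -1
    else loopA (stepA l) K (ans + 1)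
  else ans
termination_by l.length
decreasing_by
  rw [stepA_length]
  omega

def solution (scoville : List Int) (K : Int) : Int :=
  let n := scoville.length
  let l := ((List.range (n/2)).reverse).foldl (fun acc i => heapifyA acc i n) scoville
  loopA l K 0

-- ===== PORT B =====
-- linear ordered insertion (Source B's `while i < len(s) and s[i] < new: … ; s.insert(i, new)`)
def insB (x : Int) : List Int → List Int
  | [] => [x]
  | a :: t => if a < x then a :: insB x t else x :: a :: t

-- cited by loopB's decreasing_by
theorem insB_length (x : Int) (t : List Int) : (insB x t).length = t.length + 1 := by
  induction t with
  | nil => rfl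
  | cons a t ih => simp only [insB]; split <;> simp [ih]

def loopB (s : List Int) (K : Int) (ans : Int) : Int :=
  if s.getD 0 0 < K then
    if h : s.length ≤ 1 then -1
    else loopB (insB (s.getD 0 0 + 2 * s.getD 1 0) (s.drop 2)) K (ans + 1)
  else ans
termination_by s.length
decreasing_by
  simp only [insB_length, List.length_drop]
  omega

def solution_alt (scoville : List Int) (K : Int) : Int :=
  loopB (PySem.List.sorted scoville (fun x => x) false) K 0

-- ===== PRECONDITION & SPEC =====
-- Pre_ excludes only the empty list, on which Python A raises IndexError (scoville[0]).
def Pre_solution (scoville : List Int) (K : Int) : Prop := scoville ≠ []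
instance (scoville : List Int) (K : Int) : Decidable (Pre_solution scoville K) := by
  unfold Pre_solution; infer_instance

def pvWitness_solution : List Int × Int := ([1, 2, 3, 9, 10, 12], 7)

def Spec_solution (scoville : List Int) (K : Int) (out : Int) : Prop := out = solution_alt scoville K
instance (scoville : List Int) (K : Int) (out : Int) : Decidable (Spec_solution scoville K out) := by
  unfold Spec_solution; infer_instance

-- ===== CLAIM (what is proved, stated in full; the proofs are below) =====
def Claim_equal_solution : Prop := ∀ (scoville : List Int) (K : Int), Dom_solution scoville K → Pre_solution scoville K → Spec_solution scoville K (solution scoville K)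

-- ===== LEMMAS AND PROOFS =====

-- `j` is heap-ordered w.r.t. its in-range children
def nodeOK (l : List Int) (j : Nat) : Prop :=
  (2*j+1 < l.length → l.getD j 0 ≤ l.getD (2*j+1) 0) ∧
  (2*j+2 < l.length → l.getD j 0 ≤ l.getD (2*j+2) 0)

def IsHeap (l : List Int) : Prop := ∀ j, nodeOK l j

-- getD/set bookkeeping
theorem getD0_set_ne (l : List Int) (i j : Nat) (v : Int) (h : i ≠ j) :
    (l.set i v).getD j 0 = l.getD j 0 := by
  simp [List.getD_eq_getElem?_getD, List.getElem?_set_ne h]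

theorem getD0_set_self (l : List Int) (i : Nat) (v : Int) (h : i < l.length) :
    (l.set i v).getD i 0 = v := by
  simp [List.getD_eq_getElem?_getD, h]

-- moving position k's element to the front while overwriting it is a permutation
theorem cons_set_perm (h d : Int) : ∀ (t : List Int) (k : Nat), k < t.length →
    (t.getD k d :: t.set k h).Perm (h :: t) := by
  intro t
  induction t with
  | nil => intro k hk; simp at hk
  | cons c t ih =>
      intro k hk
      match k with
      | 0 => simpa using List.Perm.swap _ _ _
      | Nat.succ j =>
          simp only [List.getD_cons_succ, List.set_cons_succ]
          exact ((List.Perm.swap c (t.getD j d) (t.set j h)).trans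
            ((List.Perm.cons c (ih j (by simpa using hk))).trans (List.Perm.swap h c t)))

-- A's parallel swap `l[a], l[b] = l[b], l[a]` is a permutation
theorem swap_perm (d : Int) : ∀ (l : List Int) (a b : Nat), a < b → b < l.length →
    ((l.set a (l.getD b d)).set b (l.getD a d)).Perm l := by
  intro l
  induction l with
  | nil => intro a b _ hb; simp at hb
  | cons c t ih =>
      intro a b hab hb
      match a, b with
      | 0, Nat.succ j =>
          simp only [List.getD_cons_succ, List.getD_cons_zero, List.set_cons_zero,
            List.set_cons_succ]
          exact cons_set_perm c d t j (by simpa using hb)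
      | Nat.succ i, Nat.succ j =>
          simp only [List.getD_cons_succ, List.set_cons_succ]
          exact List.Perm.cons c (ih i j (by omega) (by simpa using hb))

-- heapSmall facts
theorem heapSmall_cases (l : List Int) (i s : Nat) (h : heapSmall l i s ≠ i) :
    heapSmall l i s = 2*i+1 ∨ heapSmall l i s = 2*i+2 := by
  unfold heapSmall heapSmall1 at *; split_ifs at * <;> omega

theorem heapSmall_le_self (l : List Int) (i s : Nat) :
    l.getD (heapSmall l i s) 0 ≤ l.getD i 0 := by
  unfold heapSmall heapSmall1; split_ifs <;> omega

theorem heapSmall_le_left (l : List Int) (i s : Nat) (h : 2*i+1 < s) :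
    l.getD (heapSmall l i s) 0 ≤ l.getD (2*i+1) 0 := by
  unfold heapSmall heapSmall1; split_ifs <;> omega

theorem heapSmall_le_right (l : List Int) (i s : Nat) (h : 2*i+2 < s) :
    l.getD (heapSmall l i s) 0 ≤ l.getD (2*i+2) 0 := by
  unfold heapSmall heapSmall1; split_ifs <;> omega

-- heapifyA touches only position i and positions ≥ 2i+1
theorem heapifyA_unchanged (l : List Int) (i s : Nat) :
    ∀ j, j ≠ i → j < 2*i+1 → (heapifyA l i s).getD j 0 = l.getD j 0 := by
  fun_induction heapifyA l i s with
  | case1 l i h ih =>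
      intro j hji hj
      have hlt := heapSmall_lt l i s h
      have hc := heapSmall_cases l i s h
      rw [ih j (by omega) (by omega)]
      rw [getD0_set_ne _ _ _ _ (by omega), getD0_set_ne _ _ _ _ (by omega)]
  | case2 => intro j _ _; rfl

-- the value ending at the root slot comes from the root or one of its children
theorem heapifyA_root_cases (l : List Int) (i s : Nat) (hi : i < l.length) :
    (heapifyA l i s).getD i 0 = l.getD i 0 ∨
    (2*i+1 < s ∧ (heapifyA l i s).getD i 0 = l.getD (2*i+1) 0) ∨
    (2*i+2 < s ∧ (heapifyA l i s).getD i 0 = l.getD (2*i+2) 0) := by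
  rw [heapifyA]
  split_ifs with h
  · have hlt := heapSmall_lt l i s h
    have hc := heapSmall_cases l i s h
    have hu : (heapifyA ((l.set (heapSmall l i s) (l.getD i 0)).set i
        (l.getD (heapSmall l i s) 0)) (heapSmall l i s) s).getD i 0
        = l.getD (heapSmall l i s) 0 := by
      rw [heapifyA_unchanged _ _ _ i (by omega) (by omega)]
      exact getD0_set_self _ _ _ (by simpa using hi)
    rcases hc with hc | hc
    · exact Or.inr (Or.inl ⟨by omega, by rw [hu, hc]⟩)
    · exact Or.inr (Or.inr ⟨by omega, by rw [hu, hc]⟩)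
  · exact Or.inl rfl

theorem heapifyA_perm (l : List Int) (i s : Nat) (hs : s ≤ l.length) :
    (heapifyA l i s).Perm l := by
  fun_induction heapifyA l i s with
  | case1 l i h ih =>
      have hlt := heapSmall_lt l i s h
      refine (ih (by simpa using hs)).trans ?_
      rw [List.set_comm _ _ h]
      exact swap_perm 0 l i (heapSmall l i s) (by omega) (by omega)
  | case2 => exact List.Perm.refl _

-- sift-down correctness: if everything strictly below i is heap-ordered,
-- everything from i on is heap-ordered after heapifyA l i l.length
theorem heapifyA_heap : ∀ (fuel : Nat) (l : List Int) (i : Nat), l.length - i ≤ fuel →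
    (∀ j, i < j → nodeOK l j) → ∀ j, i ≤ j → nodeOK (heapifyA l i l.length) j := by
  intro fuel
  induction fuel with
  | zero =>
      intro l i hf H j hij
      have hsm : heapSmall l i l.length = i := by
        unfold heapSmall heapSmall1; split_ifs <;> omega
      rw [heapifyA, dif_neg (by simp [hsm])]
      rcases Nat.lt_or_ge i j with hj | hj
      · exact H j hj
      · have : j = i := by omega
        subst this
        exact ⟨fun hg => by omega, fun hg => by omega⟩
  | succ fuel ih =>
      intro l i hf H j hij
      rw [heapifyA]
      split_ifs with h
      · -- swap with the smaller child and recurse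
        set sm := heapSmall l i l.length with hsm
        have hlt := heapSmall_lt l i l.length h
        have hc := heapSmall_cases l i l.length h
        set l' := (l.set sm (l.getD i 0)).set i (l.getD sm 0) with hl'
        have hlen' : l'.length = l.length := by simp [hl']
        have e1 : l'.getD i 0 = l.getD sm 0 := getD0_set_self _ _ _ (by simp; omega)
        have e2 : l'.getD sm 0 = l.getD i 0 := by
          rw [hl', getD0_set_ne _ _ _ _ (by omega), getD0_set_self _ _ _ (by omega)]
        have e3 : ∀ p, p ≠ i → p ≠ sm → l'.getD p 0 = l.getD p 0 := by
          intro p h1 h2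
          rw [hl', getD0_set_ne _ _ _ _ (Ne.symm h1), getD0_set_ne _ _ _ _ (Ne.symm h2)]
        have H' : ∀ j', sm < j' → nodeOK l' j' := by
          intro j' hj'
          have hn := H j' (by omega)
          refine ⟨fun hg => ?_, fun hg => ?_⟩
          · rw [e3 j' (by omega) (by omega), e3 (2*j'+1) (by omega) (by omega)]
            exact hn.1 (by omega)
          · rw [e3 j' (by omega) (by omega), e3 (2*j'+2) (by omega) (by omega)]
            exact hn.2 (by omega)
        rw [← hlen']
        have hrec := ih l' sm (by omega) H'
        set r := heapifyA l' sm l'.length with hr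
        have hrl : r.length = l.length := by rw [hr, heapifyA_length, hlen']
        have unr : ∀ p, p ≠ sm → p < 2*sm+1 → r.getD p 0 = l'.getD p 0 :=
          fun p a b => heapifyA_unchanged l' sm l'.length p a b
        have ej : ∀ p, i < p → p < 2*sm+1 → p ≠ sm → r.getD p 0 = l.getD p 0 :=
          fun p h1 h2 h3 => (unr p h3 h2).trans (e3 p (by omega) h3)
        rcases Nat.lt_or_ge j sm with hjs | hjs
        · rcases Nat.lt_or_ge i j with hij' | _
          · refine ⟨fun hg => ?_, fun hg => ?_⟩
            · rw [ej j (by omega) (by omega) (by omega),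
                ej (2*j+1) (by omega) (by omega) (by omega)]
              exact (H j hij').1 (by omega)
            · rw [ej j (by omega) (by omega) (by omega),
                ej (2*j+2) (by omega) (by omega) (by omega)]
              exact (H j hij').2 (by omega)
          · have hji : j = i := by omega
            subst hji
            have eri : r.getD j 0 = l.getD sm 0 := (unr j (by omega) (by omega)).trans e1
            have key : ∀ k, (k = 2*j+1 ∨ k = 2*j+2) → k < l.length →
                r.getD j 0 ≤ r.getD k 0 := by
              intro k hk hkl
              by_cases hks : k = sm
              · subst hks
                rcases heapifyA_root_cases l' sm l'.length (by omega) with h0 | ⟨hg, h0⟩ | ⟨hg, h0⟩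
                · rw [← hr] at h0
                  rw [eri, h0, e2]
                  exact heapSmall_le_self l j l.length
                · rw [← hr] at h0
                  rw [eri, h0, e3 (2*sm+1) (by omega) (by omega)]
                  exact (H sm (by omega)).1 (by omega)
                · rw [← hr] at h0
                  rw [eri, h0, e3 (2*sm+2) (by omega) (by omega)]
                  exact (H sm (by omega)).2 (by omega)
              · rw [eri, ej k (by omega) (by omega) hks]
                rcases hk with hk | hk <;> subst hk
                · exact heapSmall_le_left l j l.length (by omega)
                · exact heapSmall_le_right l j l.length (by omega)
            exact ⟨fun hg => key (2*j+1) (Or.inl rfl) (by omega),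
              fun hg => key (2*j+2) (Or.inr rfl) (by omega)⟩
        · exact hrec j hjs
      · -- already a heap at i
        rcases Nat.lt_or_ge i j with hj | hj
        · exact H j hj
        · have hji : j = i := by omega
          rw [hji, not_ne_iff] at *
          have h1 := heapSmall_le_left l i l.length
          have h2 := heapSmall_le_right l i l.length
          rw [h] at h1 h2
          exact ⟨fun hg => h1 hg, fun hg => h2 hg⟩

theorem heap_head_min (l : List Int) (hl : IsHeap l) :
    ∀ j, j < l.length → l.getD 0 0 ≤ l.getD j 0 := by
  intro j
  induction j using Nat.strong_induction_on with
  | _ j ih =>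
      intro hj
      rcases Nat.eq_zero_or_pos j with h0 | h0
      · subst h0; exact le_refl _
      · have hpl := ih ((j-1)/2) (by omega) (by omega)
        have hp2 : j = 2*((j-1)/2)+1 ∨ j = 2*((j-1)/2)+2 := by omega
        rcases hp2 with he | he
        · rw [he]; exact hpl.trans ((hl ((j-1)/2)).1 (by omega))
        · rw [he]; exact hpl.trans ((hl ((j-1)/2)).2 (by omega))

-- the build-heap fold
theorem build_aux (n : Nat) : ∀ (k : Nat) (l : List Int), l.length = n →
    (∀ j, k ≤ j → nodeOK l j) →
    (((List.range k).reverse).foldl (fun acc i => heapifyA acc i n) l).Perm l ∧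
    IsHeap (((List.range k).reverse).foldl (fun acc i => heapifyA acc i n) l) := by
  intro k
  induction k with
  | zero => intro l hn H; exact ⟨List.Perm.refl _, fun j => H j (Nat.zero_le j)⟩
  | succ k ih =>
      intro l hn H
      subst hn
      rw [List.range_succ, List.reverse_append]
      simp only [List.reverse_singleton, List.singleton_append, List.foldl_cons]
      have hh := heapifyA_heap l.length l k (by omega) (fun j hj => H j (by omega))
      have hlen : (heapifyA l k l.length).length = l.length := heapifyA_length l k l.length
      have hp : (heapifyA l k l.length).Perm l := heapifyA_perm l k l.length (le_refl _)
      obtain ⟨ihp, ihh⟩ := ih (heapifyA l k l.length) hlen (by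
        intro j hj
        rcases Nat.lt_or_ge j (l.length) with hjl | hjl
        · have := hh j hj
          simpa [hlen] using this
        · exact ⟨fun hg => by omega, fun hg => by omega⟩)
      exact ⟨ihp.trans hp, ihh⟩

-- the head of a sorted list equals the head of a heap with the same multiset
theorem sorted_head_eq_heap_head (s l : List Int) (hs : List.Pairwise (· ≤ ·) s)
    (hp : s.Perm l) (hl : IsHeap l) (hne : l ≠ []) : s.getD 0 0 = l.getD 0 0 := by
  rcases l with _ | ⟨l0, t⟩
  · exact absurd rfl hne
  rcases s with _ | ⟨b, u⟩
  · exact absurd hp.length_eq (by simp)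
  simp only [List.getD_cons_zero]
  have hble : ∀ x ∈ u, b ≤ x := fun x hx => List.rel_of_pairwise_cons hs hx
  apply le_antisymm
  · have hmem : l0 ∈ b :: u := hp.symm.subset (List.mem_cons_self)
    rcases List.mem_cons.mp hmem with he | hm
    · rw [he]
    · exact hble l0 hm
  · have hmem : b ∈ l0 :: t := hp.subset (List.mem_cons_self)
    obtain ⟨j, hj, he⟩ := List.mem_iff_getElem.mp hmem
    have := heap_head_min (l0 :: t) hl j hj
    rw [List.getD_eq_getElem _ _ hj, he] at this
    simpa using this

theorem insB_eq_orderedInsert (x : Int) (t : List Int) :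
    insB x t = t.orderedInsert (· ≤ ·) x := by
  induction t with
  | nil => rfl
  | cons a t ih =>
      simp only [insB, List.orderedInsert, ih]
      by_cases h : a < x
      · simp [h, not_le.mpr h]
      · simp [h, not_lt.mp h]

-- the main loop equivalence: A's heap loop = B's sorted-list loop
theorem getD0_dropLast (l : List Int) (p : Nat) (h : p < l.length - 1) :
    (l.dropLast).getD p 0 = l.getD p 0 := by
  rw [List.getD_eq_getElem _ _ (by simp; omega), List.getD_eq_getElem _ _ (by omega),
    List.getElem_dropLast]

-- everything the recursive case of loop_eq needs about one A-step and one B-step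
theorem step_facts (l s : List Int) (h2 : 2 ≤ l.length) (hheap : IsHeap l)
    (hsort : List.Pairwise (· ≤ ·) s) (hperm : s.Perm l) :
    (insB (s.getD 0 0 + 2 * s.getD 1 0) (s.drop 2)).Perm (stepA l) ∧
    List.Pairwise (· ≤ ·) (insB (s.getD 0 0 + 2 * s.getD 1 0) (s.drop 2)) ∧
    IsHeap (stepA l) ∧ stepA l ≠ [] := by
  have hne : l ≠ [] := by intro h; rw [h] at h2; simp at h2
  have hhead := sorted_head_eq_heap_head s l hsort hperm hheap hne
  have hlens := hperm.length_eq
  set l1 := (l.dropLast).set 0 (l.getLast?.getD 0) with hl1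
  set l2 := heapifyA l1 0 l1.length with hl2
  set newv := l.getD 0 0 + l2.getD 0 0 * 2 with hnew
  set l3 := l2.set 0 newv with hl3
  set l4 := heapifyA l3 0 l3.length with hl4
  have hstep : stepA l = l4 := rfl
  have hlen1 : l1.length = l.length - 1 := by simp [hl1]
  have hlen2 : l2.length = l1.length := heapifyA_length _ _ _
  have hlen3 : l3.length = l2.length := by simp [hl3]
  have hlen4 : l4.length = l3.length := heapifyA_length _ _ _
  -- l1 is a permutation of l.tail
  have hl1p : l1.Perm l.tail := by
    rcases l with _ | ⟨l0, t⟩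
    · exact absurd rfl hne
    rcases t with _ | ⟨t1, t2⟩
    · simp at h2
    have htne : (t1 :: t2 : List Int) ≠ [] := by simp
    have hgl : (l0 :: t1 :: t2 : List Int).getLast?.getD 0 = (t1 :: t2).getLast htne := by
      rw [List.getLast?_cons_cons, List.getLast?_eq_some_getLast htne]
      rfl
    have hdl : (l0 :: t1 :: t2 : List Int).dropLast = l0 :: (t1 :: t2).dropLast := by
      simp
    rw [hl1, hgl, hdl, List.set_cons_zero, List.tail_cons]
    have := List.perm_append_singleton ((t1 :: t2).getLast htne) ((t1 :: t2).dropLast)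
    rw [List.dropLast_append_getLast htne] at this
    exact this.symm
  -- positions ≥ 1 of l1 carry the same values as l
  have e1 : ∀ p, 1 ≤ p → p < l1.length → l1.getD p 0 = l.getD p 0 := by
    intro p hp hpl
    rw [hl1, getD0_set_ne _ _ _ _ (by omega), getD0_dropLast _ _ (by omega)]
  have Hmid : ∀ j, 0 < j → nodeOK l1 j := by
    intro j hj
    refine ⟨fun hg => ?_, fun hg => ?_⟩
    · rw [e1 j (by omega) (by omega), e1 (2*j+1) (by omega) (by omega)]
      exact (hheap j).1 (by omega)
    · rw [e1 j (by omega) (by omega), e1 (2*j+2) (by omega) (by omega)]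
      exact (hheap j).2 (by omega)
  have hh2 : IsHeap l2 := fun j => heapifyA_heap l1.length l1 0 (le_refl _) Hmid j (Nat.zero_le j)
  have hl2p : l2.Perm l1 := heapifyA_perm l1 0 l1.length (le_refl _)
  -- decompose s and l2
  obtain ⟨b, m, u, hsu⟩ : ∃ b m u, s = b :: m :: u := by
    rcases s with _ | ⟨b, t⟩
    · simp at hlens; omega
    rcases t with _ | ⟨m, u⟩
    · simp at hlens; omega
    exact ⟨b, m, u, rfl⟩
  obtain ⟨m2, w2, hl2u⟩ : ∃ m2 w2, l2 = m2 :: w2 := by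
    rcases hx : l2 with _ | ⟨m2, w2⟩
    · rw [hx] at hlen2; simp at hlen2; omega
    exact ⟨m2, w2, rfl⟩
  -- head values
  have hb : b = l.getD 0 0 := by rw [← hhead, hsu]; rfl
  have hbu : (m :: u).Perm l.tail := by
    rcases l with _ | ⟨l0, t⟩
    · exact absurd rfl hne
    have : b = l0 := by rw [hb]; rfl
    rw [hsu, this] at hperm
    exact hperm.cons_inv
  have hmu_l2 : (m :: u).Perm l2 := hbu.trans (hl1p.symm.trans hl2p.symm)
  have hsort_tail : List.Pairwise (· ≤ ·) (m :: u) := by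
    rw [hsu] at hsort; exact (List.pairwise_cons.mp hsort).2
  have hm : m = l2.getD 0 0 := by
    have := sorted_head_eq_heap_head (m :: u) l2 hsort_tail hmu_l2 hh2 (by
      intro h; rw [h] at hlen2; simp at hlen2; omega)
    simpa using this
  have hmm2 : m = m2 := by rw [hm, hl2u]; rfl
  have hwu : u.Perm w2 := by
    rw [hl2u, ← hmm2] at hmu_l2
    exact hmu_l2.cons_inv
  -- the merged value
  have hnewB : s.getD 0 0 + 2 * s.getD 1 0 = newv := by
    rw [hsu, hnew]
    simp only [List.getD_cons_zero, List.getD_cons_succ]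
    rw [hb, hm]
    ring
  -- l3 as a cons
  have hl3c : l3 = newv :: w2 := by rw [hl3, hl2u, List.set_cons_zero]
  -- positions ≥ 1 of l3 agree with l2
  have Hmid3 : ∀ j, 0 < j → nodeOK l3 j := by
    intro j hj
    have e3 : ∀ p, 1 ≤ p → l3.getD p 0 = l2.getD p 0 := by
      intro p hp
      rw [hl3, getD0_set_ne _ _ _ _ (by omega)]
    refine ⟨fun hg => ?_, fun hg => ?_⟩
    · rw [e3 j (by omega), e3 (2*j+1) (by omega)]
      exact (hh2 j).1 (by omega)
    · rw [e3 j (by omega), e3 (2*j+2) (by omega)]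
      exact (hh2 j).2 (by omega)
  have hh4 : IsHeap l4 := fun j => heapifyA_heap l3.length l3 0 (le_refl _) Hmid3 j (Nat.zero_le j)
  have hl4p : l4.Perm l3 := heapifyA_perm l3 0 l3.length (le_refl _)
  refine ⟨?_, ?_, ?_, ?_⟩
  · -- B's next list is a permutation of A's next heap
    rw [hstep, insB_eq_orderedInsert, hnewB, hsu]
    simp only [List.drop_succ_cons, List.drop_zero]
    refine (List.perm_orderedInsert _ _ _).trans ?_
    refine ((hwu.cons newv).trans ?_).trans hl4p.symm
    rw [hl3c]
  · rw [insB_eq_orderedInsert]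
    refine List.Pairwise.orderedInsert _ _ ?_
    rw [hsu]
    simp only [List.drop_succ_cons, List.drop_zero]
    exact (List.pairwise_cons.mp hsort_tail).2
  · rw [hstep]; exact hh4
  · rw [hstep]
    intro h
    rw [h] at hlen4
    simp at hlen4
    omega

theorem loop_eq : ∀ (fuel : Nat) (l s : List Int) (K ans : Int), l.length ≤ fuel →
    l ≠ [] → IsHeap l → List.Pairwise (· ≤ ·) s → s.Perm l →
    loopA l K ans = loopB s K ans := by
  intro fuel
  induction fuel with
  | zero =>
      intro l s K ans hf hne _ _ _
      rcases l with _ | ⟨a, t⟩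
      · exact absurd rfl hne
      · simp at hf
  | succ fuel ih =>
      intro l s K ans hf hne hheap hsort hperm
      have hlen := hperm.length_eq
      have hhead := sorted_head_eq_heap_head s l hsort hperm hheap hne
      rw [loopA, loopB]
      have hc : (s.getD 0 0 < K) = (l.getD 0 0 < K) := by rw [hhead]
      simp only [hc, hlen]
      split_ifs with hK hone
      · rfl
      · have h2 : 2 ≤ l.length := by
          have : 0 < l.length := List.length_pos_of_ne_nil hne
          omega
        obtain ⟨hp', hs', hh', hn'⟩ := step_facts l s h2 hheap hsort hperm
        exact ih (stepA l) _ K (ans + 1) (by rw [stepA_length]; omega) hn' hh' hs' hp'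
      · rfl

theorem solution_spec : Claim_equal_solution := by
  intro scoville K _ hpre
  unfold Pre_solution at hpre
  unfold Spec_solution solution solution_alt
  obtain ⟨hbp, hbh⟩ := build_aux scoville.length (scoville.length / 2) scoville rfl (by
    intro j hj
    exact ⟨fun hg => by omega, fun hg => by omega⟩)
  have hlenb := hbp.length_eq
  have hpos : 0 < scoville.length := List.length_pos_of_ne_nil hpre
  refine loop_eq (((List.range (scoville.length / 2)).reverse).foldl
      (fun acc i => heapifyA acc i scoville.length) scoville).length _ _ K 0 (le_refl _)
    ?_ hbh ?_ ?_
  · intro h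
    rw [h] at hlenb
    simp at hlenb
    omega
  · simpa using PySem.List.sorted_pairwise scoville (fun x => x)
  · exact (PySem.List.sorted_perm scoville (fun x => x) false).trans hbp.symm
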